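/- GENERATED by farm/mkstatement.py from design/units.tsv (unit `start_decoder.C14c`) and the assertions of Vorbis/Spec/StartDecoderC14.lean — do not edit.
   THE STATEMENT of the proof unit `start_decoder.C14c`: segment C14c of `start_decoder` (36 instructions; entries 0x115129;
   exits 0x114dfa,0x115129; ranges 0x115121-0x1151ba)
   takes each of its entry assertions to one of its exit assertions (`Vorbis.Spec.StartDecoder.SegC14c`), given the contracts of its callees.
   What the names mean: Vorbis/Spec/Basic.lean (the shared hypotheses), Vorbis/Spec/StartDecoderC14.lean (the assertions). The theorem to prove:
   `theorem start_decoder_C14c_ok : Vorbis.Spec.start_decoder_C14c.Statement`. -/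
import Vorbis.Spec.StartDecoderC14
namespace Vorbis.Spec.start_decoder_C14c
open X86 X86.User Asan

/-- The statement of unit `start_decoder.C14c`. -/
def Statement : Prop :=
  ∀ (Lay : Layout) (_hLay : Lay.hi = 0x1000000) (μ : Microarch) (_hμ : UserX.MicroOK μ) (u₀ : State)
    (_hcode : HasCodeNat Lay u₀ Vorbis.L.start_decoder.entry Vorbis.Code.code_start_decoder.nat Vorbis.L.start_decoder.size)
    (_h_asan_load4_noabort : Asan.SmallCheck Lay μ Vorbis.WayInv (Vorbis.CodeOK u₀) [.rax, .rcx, .rdx] 4 Vorbis.L.__asan_load4_noabort.entry)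
    (_h_asan_load2_noabort : Asan.SmallCheck Lay μ Vorbis.WayInv (Vorbis.CodeOK u₀) [.rax, .rcx, .rdx] 2 Vorbis.L.__asan_load2_noabort.entry)
    (_h_asan_store4_noabort : Asan.SmallCheck Lay μ Vorbis.WayInv (Vorbis.CodeOK u₀) [.rax, .rcx, .rdx] 4 Vorbis.L.__asan_store4_noabort.entry)
    (_h_asan_load1_noabort : Asan.SmallCheck Lay μ Vorbis.WayInv (Vorbis.CodeOK u₀) [.rax, .rdx] 1 Vorbis.L.__asan_load1_noabort.entry),
    Vorbis.Spec.StartDecoder.SegC14c Lay μ u₀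

end Vorbis.Spec.start_decoder_C14c
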